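-- pv_equiv track=rewrite | github.com/ulmenhaus/env | lib/py/gitnav/__main__.py | _tabulate
-- ===== SOURCE A (Python) =====
-- def _tabulate(items, column_count):
--     # extend items to have length that is multiple of column count
--     items = items + [''] * (column_count - (len(items) % column_count))
--     columns = [[] for _ in range(column_count)]
--     for i in range(len(items)):
--         columns[i % column_count].append(items[i])
--     spacing = {
--         i: max(len(item) for item in columns[i]) + 5
--         for i in range(column_count)
--     }
--     s = ""
--     for i in range(len(items)):
--         ci = i % column_count
--         val = columns[ci][i // column_count]
--         s += val + " " * (spacing[ci] - len(val))
--         if (i % column_count) == column_count - 1: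
--             s += "\n"
--     return s
-- ===== SOURCE B (Python) =====
-- def _tabulate(items, column_count):
--     # Same padding expression as the original (keeps the extra blank row
--     # when len(items) is a multiple of column_count).
--     padded = items + [''] * (column_count - (len(items) % column_count))
--     # Row-major reshape instead of distributing into column lists.
--     rows = [padded[r:r + column_count] for r in range(0, len(padded), column_count)]
--     # Per-column widths by scanning the rows (a transpose-style pass).
--     widths = [max(len(row[c]) for row in rows) + 5 for c in range(column_count)]
--     return ''.join(
--         ''.join(cell.ljust(widths[c]) for c, cell in enumerate(row)) + '\n'
--         for row in rows)
-- ===== Notes on version B (the rewrite author's own statement) =====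
-- stated objective: alternative
-- what changed: Replaces the column-list distribution (append into column buckets, spacing dict, flat index loop with i%cc // i//cc arithmetic) by a row-major reshape into row chunks, per-column widths computed by a transpose-style scan over rows, and a join of padded cells per row.
-- outside the precondition, e.g. on _tabulate([], -1): A returns '', B returns ''
import Mathlib
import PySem

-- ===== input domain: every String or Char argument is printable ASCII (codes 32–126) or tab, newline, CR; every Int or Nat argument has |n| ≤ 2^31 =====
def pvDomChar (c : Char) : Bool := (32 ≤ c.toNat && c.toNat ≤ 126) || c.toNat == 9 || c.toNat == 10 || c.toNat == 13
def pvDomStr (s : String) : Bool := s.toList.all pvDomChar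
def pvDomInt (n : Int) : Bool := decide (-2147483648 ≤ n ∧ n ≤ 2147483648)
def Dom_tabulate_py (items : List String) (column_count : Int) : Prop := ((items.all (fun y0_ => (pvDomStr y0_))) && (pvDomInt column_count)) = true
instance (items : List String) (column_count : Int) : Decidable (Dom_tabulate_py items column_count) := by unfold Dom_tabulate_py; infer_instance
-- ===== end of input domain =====

-- B replaces A's column-bucket distribution and spacing dict by a row-major reshape
-- with per-column widths from a transpose-style scan (alternative decomposition, same cost).


-- ===== PORT A =====
def tabulate_py (items : List String) (column_count : Int) : String :=
  -- items = items + [''] * (column_count - (len(items) % column_count))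
  let items2 := items ++ List.replicate (column_count - PySem.Int.mod (items.length : Int) column_count).toNat ""
  -- columns = [[] for _ in range(column_count)]
  let columns0 : List (List String) := (PySem.List.pyRange 0 column_count 1).map (fun _ => ([] : List String))
  -- for i in range(len(items)): columns[i % column_count].append(items[i])
  let columns := (PySem.List.pyRange 0 (items2.length : Int) 1).foldl
    (fun cols i =>
      PySem.List.pySetD cols (PySem.Int.mod i column_count)
        ((PySem.List.pyGetD cols (PySem.Int.mod i column_count) []) ++ [PySem.List.pyGetD items2 i ""]))
    columns0
  -- spacing = {i: max(len(item) for item in columns[i]) + 5 for i in range(column_count)}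
  -- (.getD 0 only totalizes the empty-generator max, which Python never reaches here)
  let spacing : PySem.Dict Int Int := (PySem.List.pyRange 0 column_count 1).foldl
    (fun d i =>
      d.insert i ((((PySem.List.pyGetD columns i []).map (fun it => PySem.Str.len it)).max?.getD 0) + 5))
    PySem.Dict.empty
  -- the output loop; " " * n is written String.ofList (List.replicate n.toNat ' ') (exact: negative n gives "")
  (PySem.List.pyRange 0 (items2.length : Int) 1).foldl
    (fun s i =>
      let ci := PySem.Int.mod i column_count
      let val := PySem.List.pyGetD (PySem.List.pyGetD columns ci []) (PySem.Int.floordiv i column_count) ""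
      let s := s ++ val ++ String.ofList (List.replicate ((spacing.getD ci 0) - PySem.Str.len val).toNat ' ')
      if ci == column_count - 1 then s ++ "\n" else s)
    ""

-- ===== PORT B =====
-- cell.ljust(w)  (exact: no truncation, w ≤ len pads nothing)
def pvLjust (s : String) (w : Int) : String :=
  s ++ String.ofList (List.replicate (w - PySem.Str.len s).toNat ' ')

def tabulate_py_alt (items : List String) (column_count : Int) : String :=
  let padded := items ++ List.replicate (column_count - PySem.Int.mod (items.length : Int) column_count).toNat ""
  -- rows = [padded[r:r+column_count] for r in range(0, len(padded), column_count)]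
  let rows := (PySem.List.pyRange 0 (padded.length : Int) column_count).map
    (fun r => PySem.List.slice padded (some r) (some (r + column_count)))
  -- widths = [max(len(row[c]) for row in rows) + 5 for c in range(column_count)]
  -- (.getD 0 only totalizes the empty-generator max, never reached under Pre_)
  let widths := (PySem.List.pyRange 0 column_count 1).map
    (fun c => ((rows.map (fun row => PySem.Str.len (PySem.List.pyGetD row c ""))).max?.getD 0) + 5)
  PySem.Str.join "" (rows.map (fun row =>
    PySem.Str.join "" ((PySem.List.enumerate row).map (fun ce => pvLjust ce.2 (PySem.List.pyGetD widths ce.1 0))) ++ "\n"))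

-- ===== PRECONDITION & SPEC =====
-- Pre_ excludes column_count ≤ 0: there Python A raises (ZeroDivisionError at column_count == 0,
-- IndexError for negative column_count with nonempty items) except the accidental corner
-- (items == [], column_count < 0) where A happens to return '' (and B returns '' too).
def Pre_tabulate_py (items : List String) (column_count : Int) : Prop := 1 ≤ column_count
instance (items : List String) (column_count : Int) : Decidable (Pre_tabulate_py items column_count) := by unfold Pre_tabulate_py; infer_instance
def pvWitness_tabulate_py : List String × Int := (["ab", "c", "def"], 2)

def Spec_tabulate_py (items : List String) (column_count : Int) (out : String) : Prop := out = tabulate_py_alt items column_count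
instance (items : List String) (column_count : Int) (out : String) : Decidable (Spec_tabulate_py items column_count out) := by unfold Spec_tabulate_py; infer_instance

-- ===== CLAIM (what is proved, stated in full; the proofs are below) =====
def Claim_equal_tabulate_py : Prop := ∀ (items : List String) (column_count : Int), Dom_tabulate_py items column_count → Pre_tabulate_py items column_count → Spec_tabulate_py items column_count (tabulate_py items column_count)

-- ===== LEMMAS AND PROOFS =====

-- string extensionality via toList
theorem pvStrExt {s t : String} (h : s.toList = t.toList) : s = t := by
  have := congrArg String.ofList h; simpa using this

-- concatenation of a list of strings (proof-side canonical form)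
def pvScat : List String → String
  | [] => ""
  | s :: t => s ++ pvScat t

theorem pvScat_append (a b : List String) : pvScat (a ++ b) = pvScat a ++ pvScat b := by
  induction a with
  | nil => simp [pvScat]
  | cons s t ih => simp [pvScat, ih, String.append_assoc]

theorem pvJoin_eq_scat (l : List String) : PySem.Str.join "" l = pvScat l := by
  apply pvStrExt
  induction l with
  | nil => simp [pvScat, PySem.Str.toList_join, PySem.Chars.join_nil]
  | cons s t ih =>
    have hstep : PySem.Chars.join ([] : List Char) (s.toList :: t.map String.toList)
        = s.toList ++ PySem.Chars.join [] (t.map String.toList) := by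
      cases t with
      | nil => simp [PySem.Chars.join_singleton]
      | cons b u => rw [List.map_cons, PySem.Chars.join_cons_cons]; simp
    have hnil : ("" : String).toList = ([] : List Char) := by decide
    simp only [PySem.Str.toList_join, List.map_cons, hnil] at ih ⊢
    rw [hstep, pvScat]
    simp [ih]

theorem pvFoldl_sappend {α : Type} (l : List α) (f : α → String) (s : String) :
    l.foldl (fun acc x => acc ++ f x) s = s ++ pvScat (l.map f) := by
  induction l generalizing s with
  | nil => simp [pvScat]
  | cons x t ih => simp [pvScat, ih, String.append_assoc]

-- cells / rows / canonical table
def pvCell (P : List String) (W : Nat → Int) (i c : Nat) : String := pvLjust (P.getD i "") (W c)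

def pvRow (P : List String) (W : Nat → Int) (k r : Nat) : String :=
  pvScat ((List.range k).map (fun c => pvCell P W (r * k + c) c)) ++ "\n"

def pvCanon (P : List String) (W : Nat → Int) (k m : Nat) : String :=
  pvScat ((List.range m).map (fun r => pvRow P W k r))

def pvColL (P : List String) (k m c : Nat) : List String :=
  (List.range m).map (fun r => P.getD (r * k + c) "")

def pvWf (P : List String) (k m c : Nat) : Int :=
  (((pvColL P k m c).map (fun it => PySem.Str.len it)).max?.getD 0) + 5



theorem pvSetD_natCast {α : Type} (xs : List α) (n : Nat) (v : α) (h : n < xs.length) :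
    PySem.List.pySetD xs (n : Int) v = xs.set n v := by
  simp [PySem.List.pySetD, PySem.List.pySet?, PySem.List.pyIdx?, h]

-- (range k).filter (· == c) = [c] for c < k
theorem pvFilter_range_beq (k c : Nat) (hc : c < k) :
    (List.range k).filter (fun j => j == c) = [c] := by
  induction k with
  | zero => omega
  | succ k ih =>
    rw [List.range_succ, List.filter_append]
    by_cases h : c < k
    · rw [ih h]
      have : ¬ (k == c) = true := by simp; omega
      simp [this]
    · have hck : c = k := by omega
      subst hck
      have : (List.range c).filter (fun j => j == c) = [] := by
        rw [List.filter_eq_nil_iff]; intro a ha; simp at ha ⊢; omega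
      simp [this]

-- indices below m*k congruent to c mod k, in order
theorem pvFilter_range_mul (k m c : Nat) (hc : c < k) :
    (List.range (m * k)).filter (fun i => i % k == c) = (List.range m).map (fun r => r * k + c) := by
  induction m with
  | zero => simp
  | succ m ih =>
    have h1 : (m + 1) * k = m * k + k := by ring
    rw [h1, List.range_add, List.filter_append, ih, List.filter_map, List.range_succ, List.map_append]
    congr 1
    have h2 : (List.range k).filter ((fun i => i % k == c) ∘ (fun j => m * k + j))
        = (List.range k).filter (fun j => j == c) := by
      apply List.filter_congr
      intro j hj
      simp only [List.mem_range] at hj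
      simp only [Function.comp]
      have : (m * k + j) % k = j := by rw [Nat.mul_comm, Nat.mul_add_mod]; exact Nat.mod_eq_of_lt hj
      rw [this]
    rw [h2, pvFilter_range_beq k c hc]
    simp

-- the column-distribution loop of A
theorem pvColsA (P : List String) (k : Nat) (hk : 0 < k) (n : Nat) :
    ((List.range n).map (fun i : Nat => (i : Int))).foldl
      (fun cols i =>
        PySem.List.pySetD cols (PySem.Int.mod i (k : Int))
          ((PySem.List.pyGetD cols (PySem.Int.mod i (k : Int)) []) ++ [PySem.List.pyGetD P i ""]))
      ((List.range k).map (fun _ => ([] : List String)))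
    = (List.range k).map
        (fun c => ((List.range n).filter (fun i => i % k == c)).map (fun i => P.getD i "")) := by
  induction n with
  | zero => simp
  | succ n ih =>
    rw [List.range_succ, List.map_append, List.foldl_append, ih]
    simp only [List.map_cons, List.map_nil, List.foldl_cons, List.foldl_nil]
    have hmod : PySem.Int.mod (n : Int) (k : Int) = ((n % k : Nat) : Int) := by simp
    have hlt : n % k < k := Nat.mod_lt _ hk
    have hget : PySem.List.pyGetD
        ((List.range k).map (fun c => ((List.range n).filter (fun i => i % k == c)).map (fun i => P.getD i ""))) ((n % k : Nat) : Int) []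
        = ((List.range n).filter (fun i => i % k == n % k)).map (fun i => P.getD i "") := by
      rw [PySem.List.pyGetD_natCast]
      exact PySem.List.getD_map_range _ _ _ _ hlt
    rw [hmod, hget]
    rw [pvSetD_natCast _ _ _ (by simp [hlt])]
    apply List.ext_getElem (by simp)
    intro c h1 h2
    simp only [List.length_map, List.length_range] at h2
    rw [List.getElem_set, List.getElem_map, List.getElem_range, List.getElem_map, List.getElem_range]
    by_cases hcc : n % k = c
    · subst hcc
      simp [List.range_succ, List.filter_append]
    · have hne : ¬ (n % k == c) = true := by simp [hcc]
      simp [List.range_succ, List.filter_append, hne, hcc]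

-- the spacing-dict loop of A
theorem pvDictA (g : Int → Int) (k c : Nat) (hc : c < k) (dflt : Int) :
    ((((List.range k).map (fun i : Nat => (i : Int))).foldl
        (fun d i => d.insert i (g i)) (PySem.Dict.empty : PySem.Dict Int Int)).getD (c : Int) dflt) = g c := by
  induction k with
  | zero => omega
  | succ k ih =>
    rw [List.range_succ, List.map_append, List.foldl_append]
    simp only [List.map_cons, List.map_nil, List.foldl_cons, List.foldl_nil]
    by_cases h : c = k
    · subst h; rw [PySem.Dict.getD_insert_self]
    · rw [PySem.Dict.getD_insert_of_ne _ _ _ (by exact_mod_cast h)]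
      exact ih (by omega)

-- a full row of the flat output loop carries the newline of its last cell
theorem pvScatRow (g : Nat → String) (k : Nat) (hk : 0 < k) :
    pvScat ((List.range k).map (fun j => g j ++ (if j == k - 1 then "\n" else "")))
      = pvScat ((List.range k).map g) ++ "\n" := by
  obtain ⟨k', rfl⟩ : ∃ k', k = k' + 1 := ⟨k - 1, by omega⟩
  rw [List.range_succ, List.map_append, List.map_append, pvScat_append, pvScat_append]
  have h1 : (List.range k').map (fun j => g j ++ (if j == k' + 1 - 1 then "\n" else ""))
      = (List.range k').map g := by
    apply List.map_congr_left
    intro j hj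
    simp only [List.mem_range] at hj
    have : ¬ (j == k' + 1 - 1) = true := by simp; omega
    simp [this]
    omega
  rw [h1]
  simp [pvScat, String.append_assoc]

-- the flat index loop groups into rows
theorem pvScatChunks (P : List String) (W : Nat → Int) (k m : Nat) (hk : 0 < k) :
    pvScat ((List.range (m * k)).map
        (fun i => pvCell P W i (i % k) ++ (if i % k == k - 1 then "\n" else "")))
      = pvCanon P W k m := by
  induction m with
  | zero => simp [pvCanon, pvScat]
  | succ m ih =>
    have h1 : (m + 1) * k = m * k + k := by ring
    rw [h1, List.range_add, List.map_append, pvScat_append, ih, List.map_map]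
    simp only [pvCanon]
    rw [List.range_succ, List.map_append, pvScat_append]
    congr 1
    · have h2 : ((List.range k).map ((fun i => pvCell P W i (i % k) ++ (if i % k == k - 1 then "\n" else "")) ∘ (fun j => m * k + j)))
          = (List.range k).map (fun j => pvCell P W (m * k + j) j ++ (if j == k - 1 then "\n" else "")) := by
        apply List.map_congr_left
        intro j hj
        simp only [List.mem_range] at hj
        have hm : (m * k + j) % k = j := by rw [Nat.mul_comm, Nat.mul_add_mod]; exact Nat.mod_eq_of_lt hj
        simp only [Function.comp, hm]
      rw [h2, pvScatRow (fun j => pvCell P W (m * k + j) j) k hk]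
      simp [pvRow, pvScat]


theorem pvLemA (items : List String) (k m : Nat) (hk0 : 0 < k)
    (hm : (items ++ List.replicate (((k : Int)) - PySem.Int.mod (items.length : Int) (k : Int)).toNat "").length = m * k) :
    tabulate_py items (k : Int)
      = pvCanon (items ++ List.replicate (((k : Int)) - PySem.Int.mod (items.length : Int) (k : Int)).toNat "")
          (pvWf (items ++ List.replicate (((k : Int)) - PySem.Int.mod (items.length : Int) (k : Int)).toNat "") k m) k m := by
  simp only [tabulate_py]
  set P := items ++ List.replicate (((k : Int)) - PySem.Int.mod (items.length : Int) (k : Int)).toNat "" with hP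
  rw [hm, PySem.List.pyRange_zero_natCast, PySem.List.pyRange_zero_natCast]
  have hinit : (List.map (fun _ => ([] : List String)) (List.map (fun j : Nat => (j : Int)) (List.range k)))
      = (List.range k).map (fun _ => ([] : List String)) := by
    rw [List.map_map]
    exact List.map_congr_left (fun a _ => rfl)
  rw [hinit, pvColsA P k hk0 (m * k)]
  have hcols : (List.range k).map
      (fun c => ((List.range (m * k)).filter (fun i => i % k == c)).map (fun i => P.getD i ""))
      = (List.range k).map (fun c => pvColL P k m c) := by
    apply List.map_congr_left
    intro c hc
    simp only [List.mem_range] at hc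
    rw [pvFilter_range_mul k m c hc, pvColL, List.map_map]
    rfl
  rw [hcols]
  -- the spacing dict, evaluated pointwise below; now the output loop
  rw [List.foldl_map]
  have hbody : ∀ (s : String) (i : Nat), i ∈ List.range (m * k) →
      (if (PySem.Int.mod ((i : Nat) : Int) (k : Int) == (k : Int) - 1) = true then
          s ++ PySem.List.pyGetD (PySem.List.pyGetD ((List.range k).map (fun c => pvColL P k m c)) (PySem.Int.mod ((i : Nat) : Int) (k : Int)) []) (PySem.Int.floordiv ((i : Nat) : Int) (k : Int)) "" ++
            String.ofList (List.replicate
              ((((List.range k).map (fun i : Nat => (i : Int))).foldl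
                  (fun d i => d.insert i ((((PySem.List.pyGetD ((List.range k).map (fun c => pvColL P k m c)) i []).map (fun it => PySem.Str.len it)).max?.getD 0) + 5))
                  PySem.Dict.empty).getD (PySem.Int.mod ((i : Nat) : Int) (k : Int)) 0
                - PySem.Str.len (PySem.List.pyGetD (PySem.List.pyGetD ((List.range k).map (fun c => pvColL P k m c)) (PySem.Int.mod ((i : Nat) : Int) (k : Int)) []) (PySem.Int.floordiv ((i : Nat) : Int) (k : Int)) "")).toNat ' ') ++ "\n"
        else
          s ++ PySem.List.pyGetD (PySem.List.pyGetD ((List.range k).map (fun c => pvColL P k m c)) (PySem.Int.mod ((i : Nat) : Int) (k : Int)) []) (PySem.Int.floordiv ((i : Nat) : Int) (k : Int)) "" ++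
            String.ofList (List.replicate
              ((((List.range k).map (fun i : Nat => (i : Int))).foldl
                  (fun d i => d.insert i ((((PySem.List.pyGetD ((List.range k).map (fun c => pvColL P k m c)) i []).map (fun it => PySem.Str.len it)).max?.getD 0) + 5))
                  PySem.Dict.empty).getD (PySem.Int.mod ((i : Nat) : Int) (k : Int)) 0
                - PySem.Str.len (PySem.List.pyGetD (PySem.List.pyGetD ((List.range k).map (fun c => pvColL P k m c)) (PySem.Int.mod ((i : Nat) : Int) (k : Int)) []) (PySem.Int.floordiv ((i : Nat) : Int) (k : Int)) "")).toNat ' ')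
      ) = s ++ (pvCell P (pvWf P k m) i (i % k) ++ (if i % k == k - 1 then "\n" else "")) := by
    intro s i hi
    simp only [List.mem_range] at hi
    have hmod : PySem.Int.mod ((i : Nat) : Int) (k : Int) = ((i % k : Nat) : Int) := by simp
    have hdiv : PySem.Int.floordiv ((i : Nat) : Int) (k : Int) = ((i / k : Nat) : Int) := by simp
    have hmk : i % k < k := Nat.mod_lt _ hk0
    have hdk : i / k < m := (Nat.div_lt_iff_lt_mul hk0).mpr hi
    have hcol : PySem.List.pyGetD ((List.range k).map (fun c => pvColL P k m c)) ((i % k : Nat) : Int) []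
        = pvColL P k m (i % k) := by
      rw [PySem.List.pyGetD_natCast]
      exact PySem.List.getD_map_range _ _ _ _ hmk
    have hval : PySem.List.pyGetD (pvColL P k m (i % k)) ((i / k : Nat) : Int) "" = P.getD i "" := by
      rw [PySem.List.pyGetD_natCast, pvColL, PySem.List.getD_map_range _ _ _ _ hdk]
      congr 1
      have h1 := Nat.div_add_mod i k
      have h2 : i / k * k = k * (i / k) := Nat.mul_comm _ _
      omega
    have hspc : (((List.range k).map (fun i : Nat => (i : Int))).foldl
        (fun d i => d.insert i ((((PySem.List.pyGetD ((List.range k).map (fun c => pvColL P k m c)) i []).map (fun it => PySem.Str.len it)).max?.getD 0) + 5))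
        PySem.Dict.empty).getD ((i % k : Nat) : Int) 0 = pvWf P k m (i % k) := by
      rw [pvDictA _ k (i % k) hmk 0, hcol, pvWf]
    have hbeq : (((i % k : Nat) : Int) == (k : Int) - 1) = (i % k == k - 1) := by
      by_cases h : i % k = k - 1
      · have h2 : ((i % k : Nat) : Int) = (k : Int) - 1 := by omega
        have h3 : ((k - 1 : Nat) : Int) = (k : Int) - 1 := by omega
        simp [h, h2, h3]
        try omega
      · have h2 : ¬ ((i % k : Nat) : Int) = (k : Int) - 1 := by omega
        have h3 : ¬ i % k = k - 1 := h
        simp [h2, h3]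
        try omega
    rw [hmod, hdiv, hcol, hval, hspc, hbeq]
    by_cases h : (i % k == k - 1) = true
    · simp only [h, if_pos]
      rw [pvCell, pvLjust]
      simp [String.append_assoc]
    · simp only [h, if_neg]
      rw [pvCell, pvLjust]
      simp [String.append_assoc, Bool.not_eq_true] at h ⊢
  have hfold := PySem.List.foldl_congr_mem (init := ("" : String)) (h := hbody)
  rw [hfold, pvFoldl_sappend, pvScatChunks P (pvWf P k m) k m hk0]
  simp


theorem pvLemB (items : List String) (k m : Nat) (hk0 : 0 < k)
    (hm : (items ++ List.replicate (((k : Int)) - PySem.Int.mod (items.length : Int) (k : Int)).toNat "").length = m * k) :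
    tabulate_py_alt items (k : Int)
      = pvCanon (items ++ List.replicate (((k : Int)) - PySem.Int.mod (items.length : Int) (k : Int)).toNat "")
          (pvWf (items ++ List.replicate (((k : Int)) - PySem.Int.mod (items.length : Int) (k : Int)).toNat "") k m) k m := by
  simp only [tabulate_py_alt]
  set P := items ++ List.replicate (((k : Int)) - PySem.Int.mod (items.length : Int) (k : Int)).toNat "" with hP
  rw [hm]
  rw [PySem.List.pyRange_of_pos _ _ (by exact_mod_cast hk0)]
  by_cases hm0 : m = 0
  · subst hm0
    have h0 : ¬ ((0 : Int) < ((0 * k : Nat) : Int)) := by simp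
    rw [if_neg h0]
    simp [pvCanon, pvScat, pvJoin_eq_scat]
  · have hmk0 : 0 < m * k := Nat.mul_pos (by omega) hk0
    have hpos : (0 : Int) < ((m * k : Nat) : Int) := by exact_mod_cast hmk0
    rw [if_pos hpos]
    have hcount : ((((m * k : Nat) : Int) - 0 + (k : Int) - 1) / (k : Int)).toNat = m := by
      have h1 : (((m * k : Nat) : Int) - 0 + (k : Int) - 1) = (((m * k + k - 1 : Nat)) : Int) := by
        push_cast
        omega
      rw [h1]
      have h2 : (((m * k + k - 1 : Nat) : Int) / ((k : Nat) : Int)) = (((m * k + k - 1) / k : Nat) : Int) := by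
        exact_mod_cast (Int.natCast_div (m * k + k - 1) k).symm
      rw [h2, Int.toNat_natCast]
      have h3 : m * k + k - 1 = k * m + (k - 1) := by
        have := Nat.mul_comm m k
        omega
      rw [h3, Nat.mul_add_div hk0, Nat.div_eq_of_lt (by omega)]
      omega
    rw [hcount]
    -- rows as row-major chunks
    have hrows : (List.range m).map (fun r => PySem.List.slice P (some ((0 : Int) + (k : Int) * (r : Nat))) (some ((0 : Int) + (k : Int) * (r : Nat) + (k : Int))))
        = (List.range m).map (fun r => (P.drop (r * k)).take k) := by
      apply List.map_congr_left
      intro r _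
      have h1 : ((0 : Int) + (k : Int) * ((r : Nat) : Int)) = ((r * k : Nat) : Int) := by push_cast; ring
      rw [h1, PySem.List.slice_natCast_add]
    have hrowlen : ∀ r, r < m → ((P.drop (r * k)).take k).length = k := by
      intro r hr
      rw [List.length_take, List.length_drop, hm]
      have h1 : r * k + k ≤ m * k := by
        have h2 : (r + 1) * k ≤ m * k := Nat.mul_le_mul_right _ (by omega)
        have h3 : r * k + k = (r + 1) * k := by ring
        omega
      omega
    have hrowget : ∀ r, r < m → ∀ c, c < k → ∀ d : String, ((P.drop (r * k)).take k).getD c d = P.getD (r * k + c) d := by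
      intro r hr c hc d
      simp [List.getD_eq_getElem?_getD, List.getElem?_take, hc, List.getElem?_drop]
    rw [pvJoin_eq_scat]
    have hscat : pvCanon P (pvWf P k m) k m = pvScat ((List.range m).map (fun r => pvRow P (pvWf P k m) k r)) := rfl
    rw [hscat]
    congr 1
    rw [List.map_map, List.map_map]
    apply List.map_congr_left
    intro r hr
    simp only [List.mem_range] at hr
    simp only [Function.comp]
    have h1 : ((0 : Int) + (k : Int) * ((r : Nat) : Int)) = ((r * k : Nat) : Int) := by push_cast; ring
    rw [h1, PySem.List.slice_natCast_add]
    rw [PySem.List.enumerate_eq_map_pyRange _ ""]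
    have h2 : PySem.List.len ((P.drop (r * k)).take k) = ((k : Nat) : Int) := by
      simp only [PySem.List.len_eq]
      exact_mod_cast congrArg (fun n : Nat => (n : Int)) (hrowlen r hr)
    rw [h2, PySem.List.pyRange_zero_natCast]
    rw [pvRow]
    congr 1
    rw [pvJoin_eq_scat]
    congr 1
    rw [List.map_map, List.map_map]
    apply List.map_congr_left
    intro c hc
    simp only [List.mem_range] at hc
    simp only [Function.comp]
    rw [List.map_map]
    simp only [PySem.List.pyGetD_natCast]
    rw [PySem.List.getD_map_range _ _ _ _ hc]
    simp only [Function.comp]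
    have h3 : ((P.drop (r * k)).take k).getD c "" = P.getD (r * k + c) "" := hrowget r hr c hc ""
    have h4 : (((List.map (fun j : Nat => ((0 : Int) + (k : Int) * (j : Nat))) (List.range m)).map
            (fun r => PySem.List.slice P (some r) (some (r + (k : Int))))).map
          (fun row => PySem.Str.len (PySem.List.pyGetD row ((c : Nat) : Int) ""))).max?.getD 0 + 5
        = pvWf P k m c := by
      rw [List.map_map, List.map_map]
      have h5 : (List.range m).map (((fun row => PySem.Str.len (PySem.List.pyGetD row ((c : Nat) : Int) "")) ∘
            (fun r => PySem.List.slice P (some r) (some (r + (k : Int))))) ∘ (fun j : Nat => ((0 : Int) + (k : Int) * (j : Nat))))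
          = (pvColL P k m c).map (fun it => PySem.Str.len it) := by
        rw [pvColL, List.map_map]
        apply List.map_congr_left
        intro j hj
        simp only [List.mem_range] at hj
        simp only [Function.comp]
        have h6 : ((0 : Int) + (k : Int) * ((j : Nat) : Int)) = ((j * k : Nat) : Int) := by push_cast; ring
        rw [h6, PySem.List.slice_natCast_add, PySem.List.pyGetD_natCast, hrowget j hj c hc ""]
      rw [h5, pvWf]
    rw [h3, h4]
    rfl

-- ===== VERDICT (by name: the statement is the Claim_ definition above) =====
theorem tabulate_py_spec : Claim_equal_tabulate_py := by
  intro items cc _hdom hpre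
  unfold Pre_tabulate_py at hpre
  unfold Spec_tabulate_py
  obtain ⟨k, rfl⟩ : ∃ k : Nat, cc = (k : Int) := ⟨cc.toNat, by omega⟩
  have hk0 : 0 < k := by exact_mod_cast hpre
  have hmod : PySem.Int.mod ((items.length : Nat) : Int) (k : Int) = ((items.length % k : Nat) : Int) := by simp
  have hpadlen : (items ++ List.replicate (((k : Int)) - PySem.Int.mod (items.length : Int) (k : Int)).toNat "").length
      = (items.length / k + 1) * k := by
    rw [List.length_append, List.length_replicate, hmod]
    have h1 : (((k : Int)) - ((items.length % k : Nat) : Int)).toNat = k - items.length % k := by omega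
    rw [h1]
    have h2 := Nat.div_add_mod items.length k
    have h3 : items.length % k < k := Nat.mod_lt _ hk0
    have h4 : (items.length / k + 1) * k = items.length / k * k + k := by ring
    have h5 : items.length / k * k = k * (items.length / k) := by ring
    omega
  rw [pvLemA items k (items.length / k + 1) hk0 hpadlen,
      pvLemB items k (items.length / k + 1) hk0 hpadlen]
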